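-- pv_equiv track=rewrite | github.com/KOPFYF/LCEveryday | Backtracking/minAbbreviation411.py | check_ambiguity
-- ===== SOURCE A (Python) =====
-- def check_ambiguity(abbr, s):
--     # O(max(len(abbr), len(s)))
--     # Decide if abbr can be an abbreviation of s. Compare letter by letter.
--     i = j = 0
--     while True:
--         if i == len(abbr) and j == len(s): return True
--         if i >= len(abbr) or j >= len(s): return False
--         if abbr[i].isdigit():
--             step = int(abbr[i])
--             i += 1
--             j += step # jump
--         else:
--             if abbr[i] != s[j]: return False
--             i += 1
--             j += 1
--     return True
-- ===== SOURCE B (Python) =====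
-- def check_ambiguity(abbr, s):
--     # Consume the remaining suffix of s directly instead of walking two indices:
--     # one pass over abbr, slicing the suffix, then check the suffix is exhausted.
--     t = s
--     for c in abbr:
--         if not t:
--             return False
--         if c.isdigit():
--             k = int(c)
--             if k > len(t):
--                 return False
--             t = t[k:]
--         else:
--             if c != t[0]:
--                 return False
--             t = t[1:]
--     return not t
-- ===== Notes on version B (the rewrite author's own statement) =====
-- stated objective: simpler
-- what changed: B replaces A's two-index while-loop with its combined end-of-both test by a single for-loop over abbr that consumes the remaining suffix of s by slicing, finishing with one emptiness check.
import Mathlib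
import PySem

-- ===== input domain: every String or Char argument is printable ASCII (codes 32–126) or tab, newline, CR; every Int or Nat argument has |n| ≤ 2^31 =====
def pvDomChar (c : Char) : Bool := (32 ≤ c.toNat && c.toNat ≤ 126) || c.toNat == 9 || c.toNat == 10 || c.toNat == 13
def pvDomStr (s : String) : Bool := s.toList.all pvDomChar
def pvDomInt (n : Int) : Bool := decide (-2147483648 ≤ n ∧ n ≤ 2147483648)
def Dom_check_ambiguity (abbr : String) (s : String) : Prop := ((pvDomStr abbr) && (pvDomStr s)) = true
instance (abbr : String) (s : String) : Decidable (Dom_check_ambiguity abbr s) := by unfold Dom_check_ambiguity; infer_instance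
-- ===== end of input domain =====

-- B replaces A's two-index while-loop by a single pass over abbr that consumes the remaining
-- suffix of s, ending with an emptiness check (objective: simpler; slicing makes B quadratic worst case, not faster).

-- ===== PORT A =====
-- A's while-loop over two indices i, j; each iteration either returns or increments i,
-- so the recursion is on abbr.length - i.
def checkGoA (abbr s : List Char) (i j : Nat) : Bool :=
  if i = abbr.length ∧ j = s.length then true
  else if abbr.length ≤ i ∨ s.length ≤ j then false
  else
    let c := abbr.getD i ' '
    if c.isDigit then
      -- step = int(abbr[i]); i += 1; j += step
      checkGoA abbr s (i + 1) (j + (c.toNat - '0'.toNat))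
    else if c ≠ s.getD j ' ' then false
    else checkGoA abbr s (i + 1) (j + 1)
termination_by abbr.length - i
decreasing_by all_goals omega

def check_ambiguity (abbr : String) (s : String) : Bool :=
  checkGoA abbr.toList s.toList 0 0

-- ===== PORT B =====
-- Source B's for-loop over abbr carrying the remaining suffix t of s, with early exits.
def checkGoB (abbr : List Char) (t : List Char) : Bool :=
  match abbr with
  | [] => t.isEmpty
  | c :: rest =>
    if t.isEmpty then false
    else if c.isDigit then
      if t.length < c.toNat - '0'.toNat then false
      else checkGoB rest (t.drop (c.toNat - '0'.toNat))
    else if c ≠ t.headD ' ' then false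
    else checkGoB rest (t.drop 1)

def check_ambiguity_alt (abbr : String) (s : String) : Bool :=
  checkGoB abbr.toList s.toList

-- ===== PRECONDITION & SPEC =====
def Spec_check_ambiguity (abbr : String) (s : String) (out : Bool) : Prop := out = check_ambiguity_alt abbr s
instance (abbr : String) (s : String) (out : Bool) : Decidable (Spec_check_ambiguity abbr s out) := by unfold Spec_check_ambiguity; infer_instance

-- ===== CLAIM (what is proved, stated in full; the proofs are below) =====
def Claim_equal_check_ambiguity : Prop := ∀ (abbr : String) (s : String), Dom_check_ambiguity abbr s → Spec_check_ambiguity abbr s (check_ambiguity abbr s)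

-- ===== LEMMAS AND PROOFS =====

-- A returns False as soon as j has run past the end of s.
theorem checkGoA_of_overrun (abbr s : List Char) (i j : Nat) (hj : s.length < j) :
    checkGoA abbr s i j = false := by
  rw [checkGoA, if_neg (by omega), if_pos (by omega)]

theorem checkGoA_eq_checkGoB (abbr s : List Char) (i j : Nat)
    (hi : i ≤ abbr.length) (hj : j ≤ s.length) :
    checkGoA abbr s i j = checkGoB (abbr.drop i) (s.drop j) := by
  by_cases hie : i = abbr.length
  · subst hie
    rw [checkGoA, List.drop_length]
    by_cases hje : j = s.length
    · simp [hje, checkGoB]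
    · rw [if_neg (by tauto), if_pos (by omega)]
      have hne : (s.drop j).isEmpty = false := by
        simp [List.drop_eq_nil_iff]; omega
      simp [checkGoB, hne]
  · have hi' : i < abbr.length := lt_of_le_of_ne hi hie
    have habbr : abbr.drop i = abbr[i] :: abbr.drop (i + 1) :=
      List.drop_eq_getElem_cons hi'
    by_cases hje : j = s.length
    · subst hje
      rw [checkGoA, habbr, List.drop_length]
      rw [if_neg (by tauto), if_pos (by omega)]
      simp [checkGoB]
    · have hj' : j < s.length := lt_of_le_of_ne hj hje
      have hne : (s.drop j).isEmpty = false := by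
        simp [List.drop_eq_nil_iff]; omega
      rw [checkGoA, habbr]
      rw [if_neg (by tauto), if_neg (by omega)]
      have hgd : abbr.getD i ' ' = abbr[i] := List.getD_eq_getElem abbr ' ' hi'
      rw [hgd]
      by_cases hdig : (abbr[i]).isDigit
      · rw [if_pos hdig]
        by_cases hov : s.length < j + (abbr[i].toNat - '0'.toNat)
        · -- A overruns j and returns false on the next iteration; B fails its length test
          rw [checkGoA_of_overrun abbr s (i + 1) (j + (abbr[i].toNat - '0'.toNat)) hov]
          have hlen : (s.drop j).length < abbr[i].toNat - '0'.toNat := by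
            rw [List.length_drop]; omega
          simp only [checkGoB, hne, Bool.false_eq_true, if_false]
          rw [if_pos hdig, if_pos hlen]
        · have hlen : ¬ (s.drop j).length < abbr[i].toNat - '0'.toNat := by
            rw [List.length_drop]; omega
          have hdd : (s.drop j).drop (abbr[i].toNat - '0'.toNat)
              = s.drop (j + (abbr[i].toNat - '0'.toNat)) := by
            rw [List.drop_drop, Nat.add_comm]
          rw [checkGoA_eq_checkGoB abbr s (i + 1) (j + (abbr[i].toNat - '0'.toNat))
              (by omega) (by omega)]
          simp only [checkGoB, hne, Bool.false_eq_true, if_false]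
          rw [if_pos hdig, if_neg hlen, hdd]
      · rw [if_neg hdig]
        have hgds : s.getD j ' ' = s[j] := List.getD_eq_getElem s ' ' hj'
        have hhead : (s.drop j).headD ' ' = s[j] := by
          rw [List.drop_eq_getElem_cons hj']; rfl
        have hdd : (s.drop j).drop 1 = s.drop (j + 1) := by
          rw [List.drop_drop, Nat.add_comm]
        rw [hgds]
        simp only [checkGoB, hne, Bool.false_eq_true, if_false]
        rw [if_neg hdig, hhead, hdd]
        by_cases hc : abbr[i] = s[j]
        · rw [if_neg (by simp [hc]), if_neg (by simp [hc])]
          exact checkGoA_eq_checkGoB abbr s (i + 1) (j + 1) (by omega) (by omega)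
        · rw [if_pos (by simp [hc]), if_pos (by simp [hc])]
  termination_by abbr.length - i
  decreasing_by all_goals omega

-- ===== VERDICT (by name: the statement is the Claim_ definition above) =====
theorem check_ambiguity_spec : Claim_equal_check_ambiguity := by
  intro abbr s _
  unfold Spec_check_ambiguity check_ambiguity check_ambiguity_alt
  simpa using checkGoA_eq_checkGoB abbr.toList s.toList 0 0 (by omega) (by omega)
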